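-- pv_equiv track=rewrite | github.com/DoctorEmmetBrown/popcorn | popcorn/stitching_20220824.py | rearrange_folders_list
-- ===== SOURCE A (Python) =====
-- def rearrange_folders_list(starting_position, number_of_lines, number_of_columns):
--     """Sorts indices of multiple-tiles image based on starting position and size of the grid
--
--     Args:
--         starting_position (str): Position of first tile (either top-left, top-right, bottom-left or bottom-right)
--         number_of_lines (int):   Number of lines in the final grid
--         number_of_columns (int): Number of columns in the final grid
--
--     Returns (list[int]): list of sorted indices
--
--     """
--     list_of_folders = list(range(0, number_of_lines * number_of_columns))
--     for nb_line in range(number_of_lines):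
--         if "meader" in starting_position:
--             if (nb_line + ("left" in starting_position) * 1) % 2 == 0:
--                 list_of_folders[nb_line * number_of_columns: nb_line * number_of_columns + number_of_columns] = \
--                     list(reversed(
--                         list_of_folders[nb_line * number_of_columns: nb_line * number_of_columns + number_of_columns]))
--
--     if "bottom" in starting_position:
--         new_list_of_folders = list(range(1, number_of_lines * number_of_columns + 1))
--         for nb_line in range(number_of_lines):
--             if nb_line * number_of_columns > 0:
--                 new_list_of_folders[nb_line * number_of_columns:
--                                     nb_line * number_of_columns + number_of_columns] = \
--                     list_of_folders[-(nb_line * number_of_columns + number_of_columns):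
--                                     -(nb_line * number_of_columns)]
--             else:
--                 new_list_of_folders[nb_line * number_of_columns:
--                                     nb_line * number_of_columns + number_of_columns] = \
--                     list_of_folders[-(nb_line * number_of_columns + number_of_columns):]
--     else:
--         new_list_of_folders = list_of_folders
--     return new_list_of_folders
-- ===== SOURCE B (Python) =====
-- def rearrange_folders_list(starting_position, number_of_lines, number_of_columns):
--     """One direct pass: pick each output row's source row, build its index block,
--     reverse it when the meander parity says so, and extend the result."""
--     meander = "meader" in starting_position  # (sic) the substring key used by the original
--     left = "left" in starting_position
--     bottom = "bottom" in starting_position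
--     result = []
--     for out_row in range(number_of_lines):
--         src_row = number_of_lines - 1 - out_row if bottom else out_row
--         block = list(range(src_row * number_of_columns,
--                            src_row * number_of_columns + number_of_columns))
--         if meander and (src_row + left) % 2 == 0:
--             block.reverse()
--         result.extend(block)
--     return result
-- ===== Notes on version B (the rewrite author's own statement) =====
-- stated objective: simpler
-- what changed: B emits the result in one direct pass - for each output row it picks the source row (flipped for 'bottom' starts), builds its 0-based index block and reverses it by the meander parity - instead of A's three-stage build / in-place slice-reversal / slice-based row reordering over mutable lists; Pre_ excludes only the corner where both dimensions are negative, where A returns accidental leftovers of range() over the positive product.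
-- outside the precondition, e.g. on rearrange_folders_list('bottom', -1, -2): A returns [1, 2], B returns []; on rearrange_folders_list('top', -1, -2): A returns [0, 1], B returns []
import Mathlib
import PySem

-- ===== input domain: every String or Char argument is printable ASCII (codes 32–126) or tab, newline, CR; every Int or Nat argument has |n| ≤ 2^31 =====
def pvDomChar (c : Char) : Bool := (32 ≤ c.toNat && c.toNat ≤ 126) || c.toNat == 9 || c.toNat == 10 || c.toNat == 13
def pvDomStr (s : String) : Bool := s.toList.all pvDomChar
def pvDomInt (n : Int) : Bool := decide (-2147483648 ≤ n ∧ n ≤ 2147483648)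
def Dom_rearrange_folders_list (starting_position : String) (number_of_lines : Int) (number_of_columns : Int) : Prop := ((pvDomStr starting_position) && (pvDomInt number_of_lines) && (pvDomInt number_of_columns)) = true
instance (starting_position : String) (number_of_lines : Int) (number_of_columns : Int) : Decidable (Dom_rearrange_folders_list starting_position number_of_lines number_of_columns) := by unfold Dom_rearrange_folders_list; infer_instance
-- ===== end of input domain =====

-- B replaces A's build / in-place slice-reversal / slice-based row-reorder pipeline by one direct
-- pass that emits each output row's block; equal on nonnegative grid dimensions (Pre_).

-- ===== PORT A =====
-- Python `xs[a:b] = ys`; exact for the uses in A, where 0 ≤ a ≤ b (prefix ++ ys ++ suffix)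
def pySetSlice (xs : List Int) (a b : Int) (ys : List Int) : List Int :=
  PySem.List.slice xs none (some a) ++ ys ++ PySem.List.slice xs (some b) none

def rearrange_folders_list (starting_position : String) (number_of_lines : Int) (number_of_columns : Int) : List Int :=
  -- list_of_folders = list(range(0, number_of_lines * number_of_columns))
  let list_of_folders0 := PySem.List.pyRange 0 (number_of_lines * number_of_columns) 1
  -- for nb_line in range(number_of_lines): … in-place meander reversal of the row's slice
  let list_of_folders := (PySem.List.pyRange 0 number_of_lines 1).foldl (fun lof nb_line =>
    if PySem.Str.isIn "meader" starting_position then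
      if PySem.Int.mod (nb_line + (if PySem.Str.isIn "left" starting_position then 1 else 0) * 1) 2 = 0 then
        pySetSlice lof (nb_line * number_of_columns) (nb_line * number_of_columns + number_of_columns)
          (PySem.List.slice lof (some (nb_line * number_of_columns))
            (some (nb_line * number_of_columns + number_of_columns))).reverse
      else lof
    else lof) list_of_folders0
  if PySem.Str.isIn "bottom" starting_position then
    -- new_list_of_folders = list(range(1, number_of_lines * number_of_columns + 1))
    let new0 := PySem.List.pyRange 1 (number_of_lines * number_of_columns + 1) 1
    (PySem.List.pyRange 0 number_of_lines 1).foldl (fun nw nb_line =>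
      if nb_line * number_of_columns > 0 then
        pySetSlice nw (nb_line * number_of_columns) (nb_line * number_of_columns + number_of_columns)
          (PySem.List.slice list_of_folders
            (some (-(nb_line * number_of_columns + number_of_columns)))
            (some (-(nb_line * number_of_columns))))
      else
        pySetSlice nw (nb_line * number_of_columns) (nb_line * number_of_columns + number_of_columns)
          (PySem.List.slice list_of_folders
            (some (-(nb_line * number_of_columns + number_of_columns))) none)) new0
  else list_of_folders

-- ===== PORT B =====
def rearrange_folders_list_alt (starting_position : String) (number_of_lines : Int) (number_of_columns : Int) : List Int :=
  let meander := PySem.Str.isIn "meader" starting_position  -- (sic) the substring key used by A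
  let left := PySem.Str.isIn "left" starting_position
  let bottom := PySem.Str.isIn "bottom" starting_position
  (PySem.List.pyRange 0 number_of_lines 1).foldl (fun result out_row =>
    let src_row := if bottom then number_of_lines - 1 - out_row else out_row
    let block := PySem.List.pyRange (src_row * number_of_columns)
      (src_row * number_of_columns + number_of_columns) 1
    let block := if meander && (PySem.Int.mod (src_row + (if left then 1 else 0)) 2 == 0)
      then block.reverse else block
    result ++ block) []

-- ===== PRECONDITION & SPEC =====
-- Pre_ excludes only the corner where BOTH dimensions are negative: there A returns accidental
-- leftovers of range over the positive product (1-based when "bottom"), values outside the task's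
-- natural domain of counts; everywhere else A and B agree.
def Pre_rearrange_folders_list (starting_position : String) (number_of_lines : Int) (number_of_columns : Int) : Prop :=
  0 ≤ number_of_lines ∨ 0 ≤ number_of_columns
instance (starting_position : String) (number_of_lines : Int) (number_of_columns : Int) : Decidable (Pre_rearrange_folders_list starting_position number_of_lines number_of_columns) := by unfold Pre_rearrange_folders_list; infer_instance

def pvWitness_rearrange_folders_list : String × Int × Int := ("bottom-left-meader", 3, 2)

def Spec_rearrange_folders_list (starting_position : String) (number_of_lines : Int) (number_of_columns : Int) (out : List Int) : Prop := out = rearrange_folders_list_alt starting_position number_of_lines number_of_columns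
instance (starting_position : String) (number_of_lines : Int) (number_of_columns : Int) (out : List Int) : Decidable (Spec_rearrange_folders_list starting_position number_of_lines number_of_columns out) := by unfold Spec_rearrange_folders_list; infer_instance

-- ===== CLAIM (what is proved, stated in full; the proofs are below) =====
def Claim_equal_rearrange_folders_list : Prop := ∀ (starting_position : String) (number_of_lines : Int) (number_of_columns : Int), Dom_rearrange_folders_list starting_position number_of_lines number_of_columns → Pre_rearrange_folders_list starting_position number_of_lines number_of_columns → Spec_rearrange_folders_list starting_position number_of_lines number_of_columns (rearrange_folders_list starting_position number_of_lines number_of_columns)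

-- ===== LEMMAS AND PROOFS =====

def pvBlk (C : Int) (r : Nat) : List Int := PySem.List.pyRange ((r : Int) * C) ((r : Int) * C + C) 1

def pvF (s : String) (C : Int) (r : Nat) : List Int :=
  if PySem.Str.isIn "meader" s = true ∧
      PySem.Int.mod ((r : Int) + (if PySem.Str.isIn "left" s then 1 else 0)) 2 = 0
  then (pvBlk C r).reverse else pvBlk C r

theorem pvBlk_length (C : Int) (r : Nat) : (pvBlk C r).length = C.toNat := by
  simp [pvBlk, PySem.List.length_pyRange_one]

theorem pvF_length (s : String) (C : Int) (r : Nat) : (pvF s C r).length = C.toNat := by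
  unfold pvF; split <;> split <;> simp [pvBlk_length]

theorem pvFlat_length (f : Nat → List Int) (c : Nat) (h : ∀ i, (f i).length = c) (l : Nat) :
    ((List.range l).flatMap f).length = l * c := by
  induction l with
  | zero => simp
  | succ n ih => simp [List.range_succ, ih, h, Nat.succ_mul]

theorem pvFlat_decomp (f : Nat → List Int) (l r : Nat) (hr : r < l) :
    (List.range l).flatMap f =
      (List.range r).flatMap f ++ f r ++
        (List.range (l - (r + 1))).flatMap (fun i => f (r + 1 + i)) := by
  have h : l = (r + 1) + (l - (r + 1)) := by omega
  rw [h, List.range_add, List.flatMap_append, List.range_succ, List.flatMap_append,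
    List.flatMap_map]
  simp

theorem pvFlat_congr (f g : Nat → List Int) (l : Nat) (h : ∀ i < l, f i = g i) :
    (List.range l).flatMap f = (List.range l).flatMap g := by
  induction l with
  | zero => simp
  | succ n ih =>
    rw [List.range_succ, List.flatMap_append, List.flatMap_append,
      ih (fun i hi => h i (by omega))]
    simp [h n (by omega)]

theorem pvBase (L C : Int) (hL : 0 ≤ L) (hC : 0 ≤ C) :
    PySem.List.pyRange 0 (L * C) 1 = (List.range L.toNat).flatMap (pvBlk C) := by
  obtain ⟨l, rfl⟩ := Int.eq_ofNat_of_zero_le hL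
  clear hL
  induction l with
  | zero => simp [PySem.List.pyRange_one_eq_nil]
  | succ n ih =>
    have h1 : ((n + 1 : Nat) : Int) * C = (n : Int) * C + C := by push_cast; ring
    rw [h1, PySem.List.pyRange_one_append 0 ((n : Int) * C) ((n : Int) * C + C)
      (by positivity) (by omega), ih]
    simp [List.range_succ, pvBlk]

theorem pvRead (f : Nat → List Int) (c : Nat) (hlen : ∀ i, (f i).length = c)
    (l r : Nat) (hr : r < l) :
    PySem.List.slice ((List.range l).flatMap f) (some ((r * c : Nat) : Int))
      (some ((r * c + c : Nat) : Int)) = f r := by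
  rw [PySem.List.slice_natCast, pvFlat_decomp f l r hr, List.append_assoc,
    List.drop_left' (pvFlat_length f c hlen r)]
  have h2 : r * c + c - r * c = c := by omega
  rw [h2, List.take_left' (hlen r)]

theorem pvWrite (f : Nat → List Int) (c : Nat) (hlen : ∀ i, (f i).length = c)
    (l r : Nat) (hr : r < l) (ys : List Int) :
    pySetSlice ((List.range l).flatMap f) ((r * c : Nat) : Int) ((r * c + c : Nat) : Int) ys
      = (List.range l).flatMap (fun i => if i = r then ys else f i) := by
  unfold pySetSlice
  rw [PySem.List.slice_to_natCast, PySem.List.slice_from_natCast,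
    pvFlat_decomp f l r hr, pvFlat_decomp (fun i => if i = r then ys else f i) l r hr]
  have hpre : (List.range r).flatMap (fun i => if i = r then ys else f i)
      = (List.range r).flatMap f := by
    apply pvFlat_congr; intro i hi; simp [Nat.ne_of_lt hi]
  have htail : (List.range (l - (r + 1))).flatMap (fun i => if r + 1 + i = r then ys else f (r + 1 + i))
      = (List.range (l - (r + 1))).flatMap (fun i => f (r + 1 + i)) := by
    apply pvFlat_congr; intro i hi; simp [show r + 1 + i ≠ r by omega]
  have ht : List.take (r * c) ((List.range r).flatMap f ++ f r ++
      (List.range (l - (r + 1))).flatMap (fun i => f (r + 1 + i))) = (List.range r).flatMap f := by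
    rw [List.append_assoc]; exact List.take_left' (pvFlat_length f c hlen r)
  have hd : List.drop (r * c + c) ((List.range r).flatMap f ++ f r ++
      (List.range (l - (r + 1))).flatMap (fun i => f (r + 1 + i)))
      = (List.range (l - (r + 1))).flatMap (fun i => f (r + 1 + i)) :=
    List.drop_left' (by simp [pvFlat_length f c hlen r, hlen r])
  rw [ht, hd, hpre, htail]
  simp

theorem pvDropSeg (f : Nat → List Int) (c : Nat) (hlen : ∀ i, (f i).length = c)
    (l r : Nat) (hr : r < l) :
    List.drop (r * c) ((List.range l).flatMap f)
      = f r ++ (List.range (l - (r + 1))).flatMap (fun i => f (r + 1 + i)) := by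
  rw [pvFlat_decomp f l r hr, List.append_assoc]
  exact List.drop_left' (pvFlat_length f c hlen r)

-- the value A's bottom loop reads at iteration m equals block l-1-m (both slice shapes)

theorem pvReadNegBoth (f : Nat → List Int) (c : Nat) (hlen : ∀ i, (f i).length = c)
    (l m : Nat) (hm : m < l) (hpos : 0 < m * c) :
    PySem.List.slice ((List.range l).flatMap f)
      (some (-((m * c + c : Nat) : Int))) (some (-((m * c : Nat) : Int))) = f (l - 1 - m) := by
  simp only [PySem.List.slice]
  rw [pvFlat_length f c hlen l,
    PySem.List.clampIdx_neg_natCast (l * c) (m * c + c) (by omega),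
    PySem.List.clampIdx_neg_natCast (l * c) (m * c) hpos]
  obtain ⟨k, hk⟩ := Nat.le.dest (Nat.succ_le_of_lt hm)
  subst hk
  simp only [Nat.succ_eq_add_one]
  have e1 : (m + 1 + k) * c = (m + 1) * c + k * c := by ring
  have e2 : (m + 1) * c = m * c + c := by ring
  have h1 : (m + 1 + k) * c - (m * c + c) = k * c := by omega
  have h2 : (m + 1 + k) * c - m * c - k * c = c := by omega
  have h3 : m + 1 + k - 1 - m = k := by omega
  rw [h1, h2, h3, pvDropSeg f c hlen (m + 1 + k) k (by omega)]
  exact List.take_left' (hlen k)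

theorem pvReadNegNone (f : Nat → List Int) (c : Nat) (hlen : ∀ i, (f i).length = c)
    (l m : Nat) (hm : m < l) (hz : m * c = 0) :
    PySem.List.slice ((List.range l).flatMap f)
      (some (-((m * c + c : Nat) : Int))) none = f (l - 1 - m) := by
  rcases Nat.mul_eq_zero.mp hz with h | h
  · -- m = 0: xs[-c:] is the last row, row l-1
    subst h
    rcases Nat.eq_zero_or_pos c with hc | hc
    · subst hc
      have hnil : (List.range l).flatMap f = [] := by
        apply List.eq_nil_of_length_eq_zero; rw [pvFlat_length f 0 hlen l]; omega
      have hf : f (l - 1) = [] :=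
        List.eq_nil_of_length_eq_zero (by simp [hlen])
      simp [hnil, hf, PySem.List.slice]
    · obtain ⟨k, hk⟩ := Nat.le.dest (Nat.one_le_iff_ne_zero.mpr (Nat.pos_iff_ne_zero.mp hm))
      rw [show ((0 * c + c : Nat) : Int) = ((c : Nat) : Int) by norm_num,
        PySem.List.slice_from_neg_natCast _ c hc, pvFlat_length f c hlen l,
        show l * c - c = (l - 1) * c by
          subst hk; have e : (1 + k) * c = c + k * c := by ring
          have e2 : 1 + k - 1 = k := by omega
          rw [e2]; omega,
        show l - 1 - 0 = l - 1 by omega,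
        pvDropSeg f c hlen l (l - 1) (by omega)]
      simp [show l - (l - 1 + 1) = 0 by omega]
  · -- c = 0: everything is empty
    subst h
    have hnil : (List.range l).flatMap f = [] := by
      apply List.eq_nil_of_length_eq_zero; rw [pvFlat_length f 0 hlen l]; omega
    have hf : f (l - 1 - m) = [] :=
      List.eq_nil_of_length_eq_zero (by simp [hlen])
    simp [hnil, hf, PySem.List.slice]

theorem pvMeander (s : String) (L C : Int) (hL : 0 ≤ L) (hC : 0 ≤ C) :
    ((PySem.List.pyRange 0 L 1).foldl (fun lof nb_line =>
      if PySem.Str.isIn "meader" s then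
        if PySem.Int.mod (nb_line + (if PySem.Str.isIn "left" s then 1 else 0) * 1) 2 = 0 then
          pySetSlice lof (nb_line * C) (nb_line * C + C)
            (PySem.List.slice lof (some (nb_line * C)) (some (nb_line * C + C))).reverse
        else lof
      else lof) (PySem.List.pyRange 0 (L * C) 1)) =
    (List.range L.toNat).flatMap (pvF s C) := by
  obtain ⟨l, rfl⟩ := Int.eq_ofNat_of_zero_le hL
  obtain ⟨c, rfl⟩ := Int.eq_ofNat_of_zero_le hC
  rw [PySem.List.pyRange_one 0 l, List.foldl_map, pvBase _ _ (by positivity) (by positivity)]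
  simp only [Int.sub_zero, Int.toNat_natCast, zero_add, mul_one]
  -- invariant: after the first m rows, rows < m carry pvF, the rest still pvBlk
  suffices h : ∀ m, m ≤ l →
      (List.range m).foldl (fun (lof : List Int) (k : Nat) =>
        if PySem.Str.isIn "meader" s = true then
          if PySem.Int.mod ((k : Int) + (if PySem.Str.isIn "left" s then 1 else 0)) 2 = 0 then
            pySetSlice lof ((k : Int) * (c : Int)) ((k : Int) * (c : Int) + (c : Int))
              (PySem.List.slice lof (some ((k : Int) * (c : Int))) (some ((k : Int) * (c : Int) + (c : Int)))).reverse
          else lof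
        else lof)
        ((List.range l).flatMap (pvBlk (c : Int)))
      = (List.range l).flatMap (fun r => if r < m then pvF s (c : Int) r else pvBlk (c : Int) r) by
    rw [h l le_rfl]
    exact pvFlat_congr _ _ l (fun i hi => by simp [hi])
  intro m
  induction m with
  | zero =>
    intro _
    simp only [List.range_zero, List.foldl_nil]
    exact pvFlat_congr _ _ l (fun i hi => by simp)
  | succ n ih =>
    intro hn1
    have hn : n < l := by omega
    set fn : Nat → List Int := fun r => if r < n then pvF s c r else pvBlk (c : Int) r with hfn
    have hlen : ∀ i, (fn i).length = (c : Int).toNat := by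
      intro i; simp only [hfn]; split
      · exact pvF_length s c i
      · exact pvBlk_length c i
    have hcast : ((n : Int)) * (c : Int) = ((n * c : Nat) : Int) := by push_cast; ring
    have hcast2 : ((n : Int)) * (c : Int) + (c : Int) = ((n * c + c : Nat) : Int) := by push_cast; ring
    rw [List.range_succ, List.foldl_append, ih (by omega), List.foldl_cons, List.foldl_nil]
    have hcnat : (c : Int).toNat = c := Int.toNat_natCast c
    by_cases hme : PySem.Str.isIn "meader" s = true
    · by_cases hpar : PySem.Int.mod ((n : Int) + (if PySem.Str.isIn "left" s then 1 else 0)) 2 = 0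
      · rw [if_pos hme, if_pos hpar, hcast2, hcast,
          pvRead fn c (by simpa [hcnat] using hlen) l n hn,
          pvWrite fn c (by simpa [hcnat] using hlen) l n hn]
        apply pvFlat_congr
        intro i hi
        by_cases hin : i = n
        · subst hin
          simp only [if_pos (Nat.lt_succ_self i), hfn, if_neg (Nat.lt_irrefl i)]
          unfold pvF
          rw [if_pos (And.intro hme hpar)]
          simp
        · simp only [if_neg hin, hfn]
          rcases Nat.lt_or_ge i n with h' | h'
          · simp [h', Nat.lt_succ_of_lt h']
          · have : ¬ i < n := by omega
            have : ¬ i < n + 1 := by omega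
            simp [*]
      · rw [if_pos hme, if_neg hpar]
        apply pvFlat_congr
        intro i hi
        by_cases hin : i = n
        · subst hin
          simp only [hfn, if_neg (Nat.lt_irrefl i), if_pos (Nat.lt_succ_self i)]
          unfold pvF
          rw [if_neg (fun h => hpar h.2)]
        · simp only [hfn]
          rcases Nat.lt_or_ge i n with h' | h'
          · simp [h', Nat.lt_succ_of_lt h']
          · have h1 : ¬ i < n := by omega
            have h2 : ¬ i < n + 1 := by omega
            simp [h1, h2]
    · rw [if_neg hme]
      apply pvFlat_congr
      intro i hi
      by_cases hin : i = n
      · subst hin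
        simp only [hfn, if_neg (Nat.lt_irrefl i), if_pos (Nat.lt_succ_self i)]
        unfold pvF
        rw [if_neg (fun h => hme h.1)]
      · simp only [hfn]
        rcases Nat.lt_or_ge i n with h' | h'
        · simp [h', Nat.lt_succ_of_lt h']
        · have h1 : ¬ i < n := by omega
          have h2 : ¬ i < n + 1 := by omega
          simp [h1, h2]

theorem pvBottom (s : String) (L C : Int) (hL : 0 ≤ L) (hC : 0 ≤ C) :
    ((PySem.List.pyRange 0 L 1).foldl (fun nw nb_line =>
      if nb_line * C > 0 then
        pySetSlice nw (nb_line * C) (nb_line * C + C)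
          (PySem.List.slice ((List.range L.toNat).flatMap (pvF s C))
            (some (-(nb_line * C + C))) (some (-(nb_line * C))))
      else
        pySetSlice nw (nb_line * C) (nb_line * C + C)
          (PySem.List.slice ((List.range L.toNat).flatMap (pvF s C))
            (some (-(nb_line * C + C))) none)) (PySem.List.pyRange 1 (L * C + 1) 1)) =
    (List.range L.toNat).flatMap (fun i => pvF s C (L.toNat - 1 - i)) := by
  obtain ⟨l, rfl⟩ := Int.eq_ofNat_of_zero_le hL
  obtain ⟨c, rfl⟩ := Int.eq_ofNat_of_zero_le hC
  simp only [Int.toNat_natCast]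
  rw [PySem.List.pyRange_one 0 l, List.foldl_map]
  simp only [Int.sub_zero, Int.toNat_natCast, zero_add]
  have hlenF : ∀ i, (pvF s (c : Int) i).length = c := by
    intro i; rw [pvF_length]; exact Int.toNat_natCast c
  have hlen0 : (PySem.List.pyRange 1 ((l : Int) * (c : Int) + 1) 1).length = l * c := by
    rw [PySem.List.length_pyRange_one]
    have : (l : Int) * (c : Int) + 1 - 1 = ((l * c : Nat) : Int) := by push_cast; ring
    rw [this, Int.toNat_natCast]
  suffices h : ∀ m, m ≤ l →
      (List.range m).foldl (fun (nw : List Int) (k : Nat) =>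
        if (k : Int) * (c : Int) > 0 then
          pySetSlice nw ((k : Int) * (c : Int)) ((k : Int) * (c : Int) + (c : Int))
            (PySem.List.slice ((List.range l).flatMap (pvF s (c : Int)))
              (some (-((k : Int) * (c : Int) + (c : Int)))) (some (-((k : Int) * (c : Int)))))
        else
          pySetSlice nw ((k : Int) * (c : Int)) ((k : Int) * (c : Int) + (c : Int))
            (PySem.List.slice ((List.range l).flatMap (pvF s (c : Int)))
              (some (-((k : Int) * (c : Int) + (c : Int)))) none))
        (PySem.List.pyRange 1 ((l : Int) * (c : Int) + 1) 1)
      = (List.range m).flatMap (fun i => pvF s (c : Int) (l - 1 - i)) ++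
          (PySem.List.pyRange 1 ((l : Int) * (c : Int) + 1) 1).drop (m * c) by
    rw [h l le_rfl, List.drop_of_length_le (by omega), List.append_nil]
  intro m
  induction m with
  | zero => simp
  | succ n ih =>
    intro hn1
    have hn : n < l := by omega
    rw [List.range_succ, List.foldl_append, ih (by omega), List.foldl_cons, List.foldl_nil]
    have hcast : ((n : Int)) * (c : Int) = ((n * c : Nat) : Int) := by push_cast; ring
    have hcast2 : ((n : Int)) * (c : Int) + (c : Int) = ((n * c + c : Nat) : Int) := by push_cast; ring
    have hys : ∀ ys : List Int,
        pySetSlice ((List.range n).flatMap (fun i => pvF s (c : Int) (l - 1 - i)) ++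
            (PySem.List.pyRange 1 ((l : Int) * (c : Int) + 1) 1).drop (n * c))
          ((n * c : Nat) : Int) ((n * c + c : Nat) : Int) ys
        = (List.range n).flatMap (fun i => pvF s (c : Int) (l - 1 - i)) ++ ys ++
            (PySem.List.pyRange 1 ((l : Int) * (c : Int) + 1) 1).drop (n * c + c) := by
      intro ys
      unfold pySetSlice
      rw [PySem.List.slice_to_natCast, PySem.List.slice_from_natCast]
      have hlenP : ((List.range n).flatMap (fun i => pvF s (c : Int) (l - 1 - i))).length = n * c :=
        pvFlat_length _ c (fun i => hlenF _) n
      rw [List.take_left' hlenP, List.drop_append, List.drop_of_length_le (by omega), hlenP,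
        List.drop_drop]
      have : n * c + (n * c + c - n * c) = n * c + c := by omega
      rw [this, List.nil_append, List.append_assoc]
    -- the value read is row l-1-n, whichever slice shape the branch uses
    have hread : (if ((n : Int)) * (c : Int) > 0 then
          PySem.List.slice ((List.range l).flatMap (pvF s (c : Int)))
            (some (-((n : Int) * (c : Int) + (c : Int)))) (some (-((n : Int) * (c : Int))))
        else
          PySem.List.slice ((List.range l).flatMap (pvF s (c : Int)))
            (some (-((n : Int) * (c : Int) + (c : Int)))) none)
        = pvF s (c : Int) (l - 1 - n) := by
      by_cases hpos : ((n : Int)) * (c : Int) > 0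
      · rw [if_pos hpos, hcast2, hcast]
        exact pvReadNegBoth _ c hlenF l n hn (by exact_mod_cast by omega)
      · rw [if_neg hpos, hcast2]
        have hz : n * c = 0 := by
          by_contra hnz
          exact hpos (by exact_mod_cast Nat.pos_of_ne_zero hnz)
        exact pvReadNegNone _ c hlenF l n hn hz
    calc (if ((n : Int)) * (c : Int) > 0 then
            pySetSlice ((List.range n).flatMap (fun i => pvF s (c : Int) (l - 1 - i)) ++
                (PySem.List.pyRange 1 ((l : Int) * (c : Int) + 1) 1).drop (n * c))
              ((n : Int) * (c : Int)) ((n : Int) * (c : Int) + (c : Int))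
              (PySem.List.slice ((List.range l).flatMap (pvF s (c : Int)))
                (some (-((n : Int) * (c : Int) + (c : Int)))) (some (-((n : Int) * (c : Int)))))
          else
            pySetSlice ((List.range n).flatMap (fun i => pvF s (c : Int) (l - 1 - i)) ++
                (PySem.List.pyRange 1 ((l : Int) * (c : Int) + 1) 1).drop (n * c))
              ((n : Int) * (c : Int)) ((n : Int) * (c : Int) + (c : Int))
              (PySem.List.slice ((List.range l).flatMap (pvF s (c : Int)))
                (some (-((n : Int) * (c : Int) + (c : Int)))) none))
        = pySetSlice ((List.range n).flatMap (fun i => pvF s (c : Int) (l - 1 - i)) ++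
              (PySem.List.pyRange 1 ((l : Int) * (c : Int) + 1) 1).drop (n * c))
            ((n : Int) * (c : Int)) ((n : Int) * (c : Int) + (c : Int))
            (if ((n : Int)) * (c : Int) > 0 then
              PySem.List.slice ((List.range l).flatMap (pvF s (c : Int)))
                (some (-((n : Int) * (c : Int) + (c : Int)))) (some (-((n : Int) * (c : Int))))
            else
              PySem.List.slice ((List.range l).flatMap (pvF s (c : Int)))
                (some (-((n : Int) * (c : Int) + (c : Int)))) none) := by split <;> rfl
      _ = (List.range n).flatMap (fun i => pvF s (c : Int) (l - 1 - i)) ++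
            pvF s (c : Int) (l - 1 - n) ++
            (PySem.List.pyRange 1 ((l : Int) * (c : Int) + 1) 1).drop (n * c + c) := by
          rw [hread, hcast2, hcast]; exact hys _
      _ = (List.range n ++ [n]).flatMap (fun i => pvF s (c : Int) (l - 1 - i)) ++
            (PySem.List.pyRange 1 ((l : Int) * (c : Int) + 1) 1).drop ((n + 1) * c) := by
          rw [show (n + 1) * c = n * c + c by ring]
          simp [List.append_assoc]

theorem pvCond (s : String) (x : Int) (b1 b2 : List Int) :
    (if PySem.Str.isIn "meader" s &&
        (PySem.Int.mod (x + (if PySem.Str.isIn "left" s then 1 else 0)) 2 == 0)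
      then b1 else b2)
    = (if PySem.Str.isIn "meader" s = true ∧
          PySem.Int.mod (x + (if PySem.Str.isIn "left" s then 1 else 0)) 2 = 0
        then b1 else b2) := by
  by_cases hme : PySem.Str.isIn "meader" s = true <;>
    by_cases hpar : PySem.Int.mod (x + (if PySem.Str.isIn "left" s then 1 else 0)) 2 = 0 <;>
      simp [*]

theorem pvAlt (s : String) (L C : Int) (hL : 0 ≤ L) (hC : 0 ≤ C) :
    rearrange_folders_list_alt s L C =
      if PySem.Str.isIn "bottom" s
      then (List.range L.toNat).flatMap (fun i => pvF s C (L.toNat - 1 - i))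
      else (List.range L.toNat).flatMap (pvF s C) := by
  obtain ⟨l, rfl⟩ := Int.eq_ofNat_of_zero_le hL
  obtain ⟨c, rfl⟩ := Int.eq_ofNat_of_zero_le hC
  unfold rearrange_folders_list_alt
  rw [PySem.List.foldl_append_eq_flatMap, List.nil_append,
    PySem.List.pyRange_one 0 (l : Int), List.flatMap_map]
  simp only [Int.sub_zero, Int.toNat_natCast, zero_add]
  by_cases hb : PySem.Str.isIn "bottom" s
  · rw [if_pos hb]
    apply pvFlat_congr
    intro i hi
    simp only [hb, if_true]
    have hsrc : (l : Int) - 1 - (i : Int) = ((l - 1 - i : Nat) : Int) := by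
      have : 1 ≤ l := by omega
      push_cast [Nat.sub_sub]; omega
    rw [hsrc, pvCond]
    unfold pvF pvBlk
    rfl
  · rw [if_neg hb]
    apply pvFlat_congr
    intro i hi
    simp only [hb, if_false, Bool.false_eq_true]
    rw [pvCond]
    unfold pvF pvBlk
    rfl

theorem pvANil (s : String) (L C : Int) (h : L * C ≤ 0) :
    rearrange_folders_list s L C = [] := by
  unfold rearrange_folders_list
  simp only []
  have h0 : PySem.List.pyRange 0 (L * C) 1 = [] := PySem.List.pyRange_one_eq_nil h
  have hstepA : ∀ (xs : List Int) (g : List Int → Int → List Int),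
      (∀ nb, g [] nb = []) → xs.foldl g [] = [] := by
    intro xs g hg
    induction xs with
    | nil => rfl
    | cons x xs ih => rw [List.foldl_cons, hg x]; exact ih
  have hlof : (PySem.List.pyRange 0 L 1).foldl (fun lof nb_line =>
      if PySem.Str.isIn "meader" s then
        if PySem.Int.mod (nb_line + (if PySem.Str.isIn "left" s then 1 else 0) * 1) 2 = 0 then
          pySetSlice lof (nb_line * C) (nb_line * C + C)
            (PySem.List.slice lof (some (nb_line * C)) (some (nb_line * C + C))).reverse
        else lof
      else lof) (PySem.List.pyRange 0 (L * C) 1) = [] := by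
    rw [h0]
    apply hstepA
    intro nb
    repeat' split
    all_goals simp [pySetSlice, PySem.List.slice]
  rw [hlof]
  have hnew0 : PySem.List.pyRange 1 (L * C + 1) 1 = [] :=
    PySem.List.pyRange_one_eq_nil (by omega)
  rw [hnew0]
  split
  · apply hstepA
    intro nb
    repeat' split
    all_goals simp [pySetSlice, PySem.List.slice]
  · rfl

theorem pvBNil (s : String) (L C : Int) (h : L ≤ 0 ∨ C ≤ 0) :
    rearrange_folders_list_alt s L C = [] := by
  unfold rearrange_folders_list_alt
  rw [PySem.List.foldl_append_eq_flatMap, List.nil_append]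
  rcases h with h | h
  · rw [PySem.List.pyRange_one_eq_nil h]; rfl
  · apply List.flatMap_eq_nil_iff.mpr
    intro x hx
    have hblk : PySem.List.pyRange ((if PySem.Str.isIn "bottom" s then L - 1 - x else x) * C)
        ((if PySem.Str.isIn "bottom" s then L - 1 - x else x) * C + C) 1 = [] :=
      PySem.List.pyRange_one_eq_nil (by omega)
    simp only [hblk]
    split <;> simp

-- ===== VERDICT (by name: the statement is the Claim_ definition above) =====
theorem rearrange_folders_list_spec : Claim_equal_rearrange_folders_list := by
  intro s L C _hdom hpre
  unfold Spec_rearrange_folders_list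
  by_cases hL : 0 ≤ L
  · by_cases hC : 0 ≤ C
    · rw [pvAlt s L C hL hC]
      unfold rearrange_folders_list
      simp only []
      rw [pvMeander s L C hL hC]
      by_cases hb : PySem.Str.isIn "bottom" s
      · simp only [hb, if_true]
        exact pvBottom s L C hL hC
      · simp only [hb, if_false, Bool.false_eq_true]
    · rw [pvANil s L C (mul_nonpos_iff.mpr (Or.inl ⟨hL, by omega⟩)),
        pvBNil s L C (Or.inr (by omega))]
  · have hC : 0 ≤ C := hpre.resolve_left hL
    rw [pvANil s L C (mul_nonpos_iff.mpr (Or.inr ⟨by omega, hC⟩)),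
      pvBNil s L C (Or.inl (by omega))]
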